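-- pv_equiv track=rewrite | github.com/ob74/AI-for-Sliding-Block-Game | Main.py | find_manhattan_distance
-- ===== SOURCE A (Python) =====
-- def find_manhattan_distance(piece_location, goal_location):
--     manhattan_distance = 99999
--
--     # Finds the manhattan distance for all locations of piece against all locations of goal
--     # for each iteration it checks if it is the lowest distance found so far, if it is then it
--     # updates the manhattan_distance variable with the new lowest value
--     for i in range(piece_location.__len__()):
--         for j in range(goal_location.__len__()):
--             val = abs(goal_location[j][0] - piece_location[i][0]) + abs(goal_location[j][1] - piece_location[i][1])
--             if val < manhattan_distance:
--                 manhattan_distance = val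
--
--     return manhattan_distance
-- ===== SOURCE B (Python) =====
-- def find_manhattan_distance(piece_location, goal_location):
--     if not piece_location or not goal_location:
--         return 99999
--     # Rotate to (x+y, x-y) so Manhattan distance becomes Chebyshev distance,
--     # sort the goals by the rotated u-coordinate, and for each piece point
--     # scan outward from its binary-searched position, stopping a direction as
--     # soon as the u-gap alone reaches the best distance found so far.
--     goals = sorted(((g[0] + g[1], g[0] - g[1]) for g in goal_location),
--                    key=lambda t: t[0])
--     best = 99999
--     for p in piece_location:
--         pu, pv = p[0] + p[1], p[0] - p[1]
--         # leftmost index with goals[idx][0] >= pu (hand-rolled bisect_left)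
--         lo, hi = 0, len(goals)
--         while lo < hi:
--             mid = (lo + hi) // 2
--             if goals[mid][0] < pu:
--                 lo = mid + 1
--             else:
--                 hi = mid
--         i = lo
--         while i < len(goals):
--             gu, gv = goals[i]
--             if gu - pu >= best:
--                 break
--             d = max(abs(gu - pu), abs(gv - pv))
--             if d < best:
--                 best = d
--             i += 1
--         i = lo - 1
--         while i >= 0:
--             gu, gv = goals[i]
--             if pu - gu >= best:
--                 break
--             d = max(abs(gu - pu), abs(gv - pv))
--             if d < best:
--                 best = d
--             i -= 1
--     return best
-- ===== Notes on version B (the rewrite author's own statement) =====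
-- stated objective: faster
-- what changed: B rotates points to (x+y, x-y) where Manhattan = Chebyshev distance, sorts the goals by the rotated u-coordinate once, binary-searches each piece point's position and scans outward with pruning (a direction stops as soon as the u-gap alone reaches the current best), instead of A's exhaustive index-based double loop over all pairs.
import Mathlib
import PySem

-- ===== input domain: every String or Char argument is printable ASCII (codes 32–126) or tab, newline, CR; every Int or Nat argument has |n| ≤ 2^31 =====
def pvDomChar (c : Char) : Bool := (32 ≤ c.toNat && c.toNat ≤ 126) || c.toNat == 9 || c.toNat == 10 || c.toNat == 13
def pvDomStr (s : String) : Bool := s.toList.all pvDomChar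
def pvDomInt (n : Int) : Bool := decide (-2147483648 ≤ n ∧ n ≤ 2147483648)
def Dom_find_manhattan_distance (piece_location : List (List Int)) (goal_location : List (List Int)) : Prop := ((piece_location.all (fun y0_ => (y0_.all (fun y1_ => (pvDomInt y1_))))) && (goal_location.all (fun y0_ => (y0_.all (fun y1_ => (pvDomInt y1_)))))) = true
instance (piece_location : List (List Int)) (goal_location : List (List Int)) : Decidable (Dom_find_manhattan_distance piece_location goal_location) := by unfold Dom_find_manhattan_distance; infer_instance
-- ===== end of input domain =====

-- B rotates the points to (x+y, x-y) — where Manhattan distance equals Chebyshev distance —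
-- sorts the goals by the rotated u-coordinate, binary-searches each piece point's position and
-- scans outward with pruning (a direction stops once the u-gap alone reaches the current best),
-- replacing A's exhaustive double loop (objective: faster on typical data).

-- ===== PORT A =====
def find_manhattan_distance (piece_location : List (List Int)) (goal_location : List (List Int)) : Int :=
  (PySem.List.pyRange 0 (piece_location.length : Int) 1).foldl (fun manhattan_distance i =>
    (PySem.List.pyRange 0 (goal_location.length : Int) 1).foldl (fun md j =>
      let val :=
        |PySem.List.pyGetD (PySem.List.pyGetD goal_location j []) 0 0
           - PySem.List.pyGetD (PySem.List.pyGetD piece_location i []) 0 0|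
        + |PySem.List.pyGetD (PySem.List.pyGetD goal_location j []) 1 0
           - PySem.List.pyGetD (PySem.List.pyGetD piece_location i []) 1 0|
      if val < md then val else md) manhattan_distance) 99999

-- ===== PORT B =====
-- rotate a point to (x+y, x-y)
def pvRot (q : List Int) : Int × Int :=
  (PySem.List.pyGetD q 0 0 + PySem.List.pyGetD q 1 0,
   PySem.List.pyGetD q 0 0 - PySem.List.pyGetD q 1 0)

-- Source B's hand-rolled bisect_left: leftmost index with gs[idx][0] >= pu
-- (gs[mid] ported as getD: mid < hi ≤ gs.length on every call from the port, so it is exact)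
def pvBisect (gs : List (Int × Int)) (pu : Int) (lo hi : Nat) : Nat :=
  if _h : lo < hi then
    let mid := (lo + hi) / 2
    if (gs.getD mid (0, 0)).1 < pu then pvBisect gs pu (mid + 1) hi
    else pvBisect gs pu lo mid
  else lo
termination_by hi - lo
decreasing_by all_goals omega

-- Source B's rightward while-loop over goals[lo:] with its break (i ← the structural tail)
def pvScanR (pu pv best : Int) : List (Int × Int) → Int
  | [] => best
  | (gu, gv) :: t =>
    if gu - pu ≥ best then best
    else
      let d := max |gu - pu| |gv - pv|
      pvScanR pu pv (if d < best then d else best) t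

-- Source B's leftward while-loop over goals[:lo] in reverse with its break
def pvScanL (pu pv best : Int) : List (Int × Int) → Int
  | [] => best
  | (gu, gv) :: t =>
    if pu - gu ≥ best then best
    else
      let d := max |gu - pu| |gv - pv|
      pvScanL pu pv (if d < best then d else best) t

def find_manhattan_distance_alt (piece_location : List (List Int)) (goal_location : List (List Int)) : Int :=
  if piece_location = [] ∨ goal_location = [] then 99999
  else
  let goals := PySem.List.sorted (goal_location.map pvRot) (fun t => t.1) false
  piece_location.foldl (fun best p =>
    let pu := PySem.List.pyGetD p 0 0 + PySem.List.pyGetD p 1 0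
    let pv := PySem.List.pyGetD p 0 0 - PySem.List.pyGetD p 1 0
    let lo := pvBisect goals pu 0 goals.length
    pvScanL pu pv (pvScanR pu pv best (goals.drop lo)) ((goals.take lo).reverse)) 99999

-- ===== PRECONDITION & SPEC =====
-- Pre_ excludes exactly the inputs on which the Python A raises IndexError: both lists nonempty
-- and some point with fewer than two coordinates (B raises IndexError there too).
def Pre_find_manhattan_distance (piece_location : List (List Int)) (goal_location : List (List Int)) : Prop :=
  piece_location = [] ∨ goal_location = [] ∨
    ((∀ r ∈ piece_location, 2 ≤ r.length) ∧ (∀ r ∈ goal_location, 2 ≤ r.length))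
instance (piece_location : List (List Int)) (goal_location : List (List Int)) : Decidable (Pre_find_manhattan_distance piece_location goal_location) := by unfold Pre_find_manhattan_distance; infer_instance

def pvWitness_find_manhattan_distance : List (List Int) × List (List Int) := ([[0, 0], [3, 4]], [[1, 2]])

def Spec_find_manhattan_distance (piece_location : List (List Int)) (goal_location : List (List Int)) (out : Int) : Prop := out = find_manhattan_distance_alt piece_location goal_location
instance (piece_location : List (List Int)) (goal_location : List (List Int)) (out : Int) : Decidable (Spec_find_manhattan_distance piece_location goal_location out) := by unfold Spec_find_manhattan_distance; infer_instance

-- ===== CLAIM (what is proved, stated in full; the proofs are below) =====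
def Claim_equal_find_manhattan_distance : Prop := ∀ (piece_location : List (List Int)) (goal_location : List (List Int)), Dom_find_manhattan_distance piece_location goal_location → Pre_find_manhattan_distance piece_location goal_location → Spec_find_manhattan_distance piece_location goal_location (find_manhattan_distance piece_location goal_location)

-- ===== LEMMAS AND PROOFS =====

-- Manhattan distance of one pair of rows, as A computes it
def pvMan (pr gr : List Int) : Int :=
  |PySem.List.pyGetD gr 0 0 - PySem.List.pyGetD pr 0 0|
    + |PySem.List.pyGetD gr 1 0 - PySem.List.pyGetD pr 1 0|

-- Chebyshev distance in the rotated plane, as B computes it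
def pvCheb (pu pv : Int) (g : Int × Int) : Int := max |g.1 - pu| |g.2 - pv|

-- the unpruned running minimum of pvCheb over a list
def pvM (pu pv : Int) (l : List (Int × Int)) (b : Int) : Int :=
  l.foldl (fun b g => min b (pvCheb pu pv g)) b

lemma pv_abs_max (p0 p1 g0 g1 : Int) :
    |g0 - p0| + |g1 - p1| = max |(g0 + g1) - (p0 + p1)| |(g0 - g1) - (p0 - p1)| := by
  rcases abs_cases (g0 - p0) with ⟨h1, _⟩ | ⟨h1, _⟩ <;>
    rcases abs_cases (g1 - p1) with ⟨h2, _⟩ | ⟨h2, _⟩ <;>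
    rcases abs_cases ((g0 + g1) - (p0 + p1)) with ⟨h3, _⟩ | ⟨h3, _⟩ <;>
    rcases abs_cases ((g0 - g1) - (p0 - p1)) with ⟨h4, _⟩ | ⟨h4, _⟩ <;>
    omega

lemma pv_cheb_eq_man (pr gr : List Int) :
    pvCheb (PySem.List.pyGetD pr 0 0 + PySem.List.pyGetD pr 1 0)
           (PySem.List.pyGetD pr 0 0 - PySem.List.pyGetD pr 1 0) (pvRot gr) = pvMan pr gr := by
  simp only [pvCheb, pvRot, pvMan]
  exact (pv_abs_max _ _ _ _).symm

-- A is the nested running minimum of pvMan over both lists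
lemma pvA_eq (p g : List (List Int)) :
    find_manhattan_distance p g
      = p.foldl (fun md pr => g.foldl (fun md gr => min md (pvMan pr gr)) md) 99999 := by
  unfold find_manhattan_distance
  rw [PySem.List.foldl_pyRange_zero_pyGetD' p []
    (f := fun md pr =>
      (PySem.List.pyRange 0 (g.length : Int) 1).foldl (fun md j =>
        let val :=
          |PySem.List.pyGetD (PySem.List.pyGetD g j []) 0 0 - PySem.List.pyGetD pr 0 0|
          + |PySem.List.pyGetD (PySem.List.pyGetD g j []) 1 0 - PySem.List.pyGetD pr 1 0|
        if val < md then val else md) md) 99999]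
  refine PySem.List.foldl_congr_mem _ _ _ _ ?_
  intro md pr _
  rw [PySem.List.foldl_pyRange_zero_pyGetD' g []
    (f := fun md gr =>
      let val :=
        |PySem.List.pyGetD gr 0 0 - PySem.List.pyGetD pr 0 0|
        + |PySem.List.pyGetD gr 1 0 - PySem.List.pyGetD pr 1 0|
      if val < md then val else md) md]
  refine PySem.List.foldl_congr_mem _ _ _ _ ?_
  intro md gr _
  dsimp only
  simp only [pvMan]
  rcases lt_or_ge (|PySem.List.pyGetD gr 0 0 - PySem.List.pyGetD pr 0 0|
    + |PySem.List.pyGetD gr 1 0 - PySem.List.pyGetD pr 1 0|) md with h | h <;>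
    simp [min_def] <;> omega

-- the unpruned minimum is unchanged by elements at distance ≥ b
lemma pvM_of_all_ge (pu pv : Int) (l : List (Int × Int)) (b : Int)
    (h : ∀ g ∈ l, b ≤ pvCheb pu pv g) : pvM pu pv l b = b := by
  induction l with
  | nil => rfl
  | cons g t ih =>
    simp only [pvM, List.foldl_cons]
    rw [min_eq_left (h g (List.mem_cons_self))]
    exact ih (fun x hx => h x (List.mem_cons_of_mem _ hx))

-- the pruned rightward scan over a u-nondecreasing list computes the unpruned minimum
lemma pvScanR_eq (pu pv b : Int) (l : List (Int × Int))
    (hs : l.Pairwise (fun a c => a.1 ≤ c.1)) : pvScanR pu pv b l = pvM pu pv l b := by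
  induction l generalizing b with
  | nil => rfl
  | cons g t ih =>
    obtain ⟨gu, gv⟩ := g
    rw [List.pairwise_cons] at hs
    by_cases hbr : gu - pu ≥ b
    · rw [pvScanR, if_pos hbr]
      refine (pvM_of_all_ge pu pv _ b ?_).symm
      intro x hx
      rcases List.mem_cons.mp hx with hx | hx
      subst hx
      · simp only [pvCheb]
        have : gu - pu ≤ |gu - pu| := le_abs_self _
        calc b ≤ |gu - pu| := by omega
          _ ≤ max |gu - pu| |gv - pv| := le_max_left _ _
      · have hu : gu ≤ x.1 := hs.1 x hx
        simp only [pvCheb]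
        have : x.1 - pu ≤ |x.1 - pu| := le_abs_self _
        calc b ≤ |x.1 - pu| := by omega
          _ ≤ max |x.1 - pu| |x.2 - pv| := le_max_left _ _
    · rw [pvScanR, if_neg hbr]
      dsimp only
      rw [ih _ hs.2]
      have hmin : (if max |gu - pu| |gv - pv| < b then max |gu - pu| |gv - pv| else b)
          = min b (max |gu - pu| |gv - pv|) := by
        rcases lt_or_ge (max |gu - pu| |gv - pv|) b with h | h
        · rw [if_pos h, min_eq_right h.le]
        · rw [if_neg (not_lt.mpr h), min_eq_left h]
      simp only [pvM, List.foldl_cons, pvCheb]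
      rw [hmin]

-- the pruned leftward scan over a u-nonincreasing list computes the unpruned minimum
lemma pvScanL_eq (pu pv b : Int) (l : List (Int × Int))
    (hs : l.Pairwise (fun a c => c.1 ≤ a.1)) : pvScanL pu pv b l = pvM pu pv l b := by
  induction l generalizing b with
  | nil => rfl
  | cons g t ih =>
    obtain ⟨gu, gv⟩ := g
    rw [List.pairwise_cons] at hs
    by_cases hbr : pu - gu ≥ b
    · rw [pvScanL, if_pos hbr]
      refine (pvM_of_all_ge pu pv _ b ?_).symm
      intro x hx
      rcases List.mem_cons.mp hx with hx | hx
      subst hx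
      · simp only [pvCheb]
        have : pu - gu ≤ |gu - pu| := by rw [abs_sub_comm]; exact le_abs_self _
        calc b ≤ |gu - pu| := by omega
          _ ≤ max |gu - pu| |gv - pv| := le_max_left _ _
      · have hu : x.1 ≤ gu := hs.1 x hx
        simp only [pvCheb]
        have : pu - x.1 ≤ |x.1 - pu| := by rw [abs_sub_comm]; exact le_abs_self _
        calc b ≤ |x.1 - pu| := by omega
          _ ≤ max |x.1 - pu| |x.2 - pv| := le_max_left _ _
    · rw [pvScanL, if_neg hbr]
      dsimp only
      rw [ih _ hs.2]
      have hmin : (if max |gu - pu| |gv - pv| < b then max |gu - pu| |gv - pv| else b)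
          = min b (max |gu - pu| |gv - pv|) := by
        rcases lt_or_ge (max |gu - pu| |gv - pv|) b with h | h
        · rw [if_pos h, min_eq_right h.le]
        · rw [if_neg (not_lt.mpr h), min_eq_left h]
      simp only [pvM, List.foldl_cons, pvCheb]
      rw [hmin]

-- the min-fold is invariant under permutation
lemma pvM_perm (pu pv : Int) {l l' : List (Int × Int)} (h : l.Perm l') (b : Int) :
    pvM pu pv l b = pvM pu pv l' b := by
  unfold pvM
  exact @List.Perm.foldl_eq _ _ _ _ _
    ⟨fun b x y => by simp only [min_assoc]; rw [min_comm (pvCheb pu pv x)]⟩ h b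

-- ===== VERDICT (by name: the statement is the Claim_ definition above) =====
theorem find_manhattan_distance_spec : Claim_equal_find_manhattan_distance := by
  intro p g _dom _pre
  unfold Spec_find_manhattan_distance
  rw [pvA_eq]
  unfold find_manhattan_distance_alt
  by_cases hpe : p = [] ∨ g = []
  · rw [if_pos hpe]
    rcases hpe with h | h <;> subst h
    · rfl
    · simp only [List.foldl_nil]
      exact List.foldl_fixed p
  rw [if_neg hpe]
  refine (PySem.List.foldl_congr_mem _ _ _ _ ?_).symm
  intro best pr _
  dsimp only
  set goals := PySem.List.sorted (g.map pvRot) (fun t => t.1) false with hg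
  set pu := PySem.List.pyGetD pr 0 0 + PySem.List.pyGetD pr 1 0 with hpu
  set pv := PySem.List.pyGetD pr 0 0 - PySem.List.pyGetD pr 1 0 with hpv
  set lo := pvBisect goals pu 0 goals.length with hlo
  have hpair : goals.Pairwise (fun a c => a.1 ≤ c.1) := PySem.List.sorted_pairwise _ _
  have hdrop : (goals.drop lo).Pairwise (fun a c => a.1 ≤ c.1) :=
    hpair.sublist (List.drop_sublist _ _)
  have htake : ((goals.take lo).reverse).Pairwise (fun a c : Int × Int => c.1 ≤ a.1) := by
    rw [List.pairwise_reverse]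
    exact hpair.sublist (List.take_sublist _ _)
  rw [pvScanR_eq _ _ _ _ hdrop, pvScanL_eq _ _ _ _ htake]
  have hperm : ((goals.drop lo) ++ (goals.take lo).reverse).Perm (g.map pvRot) := by
    have h1 : ((goals.drop lo) ++ (goals.take lo).reverse).Perm goals := by
      refine ((List.Perm.append_left _ (List.reverse_perm _)).trans
        (List.perm_append_comm.trans ?_))
      rw [List.take_append_drop]
    exact h1.trans (PySem.List.sorted_perm _ _ false)
  have : pvM pu pv ((goals.take lo).reverse) (pvM pu pv (goals.drop lo) best)
      = pvM pu pv (g.map pvRot) best := by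
    rw [show pvM pu pv ((goals.take lo).reverse) (pvM pu pv (goals.drop lo) best)
        = pvM pu pv ((goals.drop lo) ++ (goals.take lo).reverse) best by
      unfold pvM; rw [List.foldl_append]]
    exact pvM_perm pu pv hperm best
  rw [this]
  unfold pvM
  rw [List.foldl_map]
  refine (PySem.List.foldl_congr_mem _ _ _ _ ?_).symm
  intro md gr _
  rw [hpu, hpv, pv_cheb_eq_man]
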